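-- pv_equiv track=rewrite | github.com/SIRIUS-AAA/The-Influence-of-the-Shadow-of-the-Future-on-the-Evolution-of-Cooperative-Strategies | Programs/experiment_exp3_analyze.py | is_rotation_JJ_FF
-- ===== SOURCE A (Python) =====
-- from typing import List, Tuple
--
-- def is_rotation_JJ_FF(seq: List[str]) -> bool:
--     if len(seq) < 2: return False
--     a, b = seq[0], seq[1]
--     if not ({a,b} == {"JJ","FF"}): return False
--     for i, s in enumerate(seq):
--         exp = a if (i % 2 == 0) else b
--         if s != exp: return False
--     return True
-- ===== SOURCE B (Python) =====
-- def is_rotation_JJ_FF(seq):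
--     valid = {"JJ", "FF"}
--     return (len(seq) >= 2
--             and all(s in valid for s in seq)
--             and all(x != y for x, y in zip(seq, seq[1:])))
-- ===== Notes on version B (the rewrite author's own statement) =====
-- stated objective: simpler
-- what changed: Replaces the index-parity loop matching each element against a computed expected symbol with a local pairwise invariant: length >= 2, every element in {JJ,FF}, and no two adjacent elements equal.
import Mathlib
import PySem

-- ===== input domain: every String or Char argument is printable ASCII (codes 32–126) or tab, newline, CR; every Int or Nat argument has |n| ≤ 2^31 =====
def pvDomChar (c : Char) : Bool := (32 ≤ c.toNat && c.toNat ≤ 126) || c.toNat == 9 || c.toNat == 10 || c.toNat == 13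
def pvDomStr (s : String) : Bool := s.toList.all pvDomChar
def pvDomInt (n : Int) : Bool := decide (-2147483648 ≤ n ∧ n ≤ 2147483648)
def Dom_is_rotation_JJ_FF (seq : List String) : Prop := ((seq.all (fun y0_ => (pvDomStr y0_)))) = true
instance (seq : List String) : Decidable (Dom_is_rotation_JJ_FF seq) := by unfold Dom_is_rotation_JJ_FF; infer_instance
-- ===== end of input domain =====

-- B checks the local pairwise invariant (all symbols valid, no equal neighbours) instead of
-- matching each element against an expected symbol computed from its index parity; same values.

-- ===== PORT A =====
-- the 'for i, s in enumerate(seq)' loop of A, carrying the running index i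
def pvALoop (a b : String) (i : Nat) : List String → Bool
  | [] => true
  | s :: rest =>
    if s ≠ (if i % 2 = 0 then a else b) then false else pvALoop a b (i + 1) rest

def is_rotation_JJ_FF (seq : List String) : Bool :=
  match seq with
  | a :: b :: _ =>
    if ¬ (PySem.Set.equal (PySem.Set.ofList [a, b]) (PySem.Set.ofList ["JJ", "FF"])) then false
    else pvALoop a b 0 seq
  | _ => false  -- len(seq) < 2

-- ===== PORT B =====
def is_rotation_JJ_FF_alt (seq : List String) : Bool :=
  decide (2 ≤ seq.length)
    && seq.all (fun s => PySem.Set.contains (PySem.Set.ofList ["JJ", "FF"]) s)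
    && (seq.zip seq.tail).all (fun p => p.1 ≠ p.2)

-- ===== PRECONDITION & SPEC =====
def Spec_is_rotation_JJ_FF (seq : List String) (out : Bool) : Prop := out = is_rotation_JJ_FF_alt seq
instance (seq : List String) (out : Bool) : Decidable (Spec_is_rotation_JJ_FF seq out) := by unfold Spec_is_rotation_JJ_FF; infer_instance

-- ===== CLAIM (what is proved, stated in full; the proofs are below) =====
def Claim_equal_is_rotation_JJ_FF : Prop := ∀ (seq : List String), Dom_is_rotation_JJ_FF seq → Spec_is_rotation_JJ_FF seq (is_rotation_JJ_FF seq)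

-- ===== LEMMAS AND PROOFS =====

-- shifting the index by 2 does not change the expected-symbol pattern
theorem pvALoop_add_two (a b : String) : ∀ (l : List String) (i : Nat),
    pvALoop a b (i + 2) l = pvALoop a b i l := by
  intro l
  induction l with
  | nil => intro i; rfl
  | cons s rest ih =>
    intro i
    simp only [pvALoop]
    have h2 : (i + 2) % 2 = i % 2 := by omega
    rw [h2]
    split_ifs <;> first | rfl | exact ih (i + 1)

-- starting one position later swaps the roles of a and b
theorem pvALoop_one_swap : ∀ (l : List String) (a b : String),
    pvALoop a b 1 l = pvALoop b a 0 l := by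
  intro l
  induction l with
  | nil => intro a b; rfl
  | cons s rest ih =>
    intro a b
    simp only [pvALoop]
    norm_num
    congr 1
    rw [ih b a, ← pvALoop_add_two a b rest 0]

-- characterisation of A's set-equality test on the first two symbols
theorem pvSetEq_iff (a b : String) :
    PySem.Set.equal (PySem.Set.ofList [a, b]) (PySem.Set.ofList ["JJ", "FF"]) = true ↔
      ((a = "JJ" ∧ b = "FF") ∨ (a = "FF" ∧ b = "JJ")) := by
  have hof : PySem.Set.ofList ["JJ", "FF"] = ["JJ", "FF"] := by decide
  simp only [PySem.Set.equal, PySem.Set.issubset, PySem.Set.contains, Bool.and_eq_true,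
    List.all_eq_true, List.contains_iff_mem, hof, PySem.Set.mem_ofList]
  -- (some rewrites only fire in one direction; harmless)
  constructor
  · rintro ⟨hsub, hsup⟩
    have ha := hsub a (by simp [PySem.Set.mem_ofList])
    have hb := hsub b (by simp [PySem.Set.mem_ofList])
    have hJ := hsup "JJ" (by simp)
    have hF := hsup "FF" (by simp)
    simp only [List.mem_cons, List.mem_singleton, List.not_mem_nil, or_false,
      PySem.Set.mem_ofList] at ha hb hJ hF
    rcases ha with rfl | rfl <;> rcases hb with rfl | rfl <;> simp_all
  · rintro (⟨rfl, rfl⟩ | ⟨rfl, rfl⟩) <;> simp [PySem.Set.mem_ofList] <;> decide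

-- the chained form of B's pairwise invariant: every element valid and different from its predecessor
def pvChained (prev : String) : List String → Bool
  | [] => true
  | s :: rest =>
    (decide (s = "JJ") || decide (s = "FF")) && decide (prev ≠ s) && pvChained s rest

theorem pvChained_eq_alt_tail (prev : String) : ∀ (l : List String),
    pvChained prev l
      = (l.all (fun s => PySem.Set.contains (PySem.Set.ofList ["JJ", "FF"]) s)
          && ((prev :: l).zip l).all (fun p => p.1 ≠ p.2)) := by
  intro l
  induction l generalizing prev with
  | nil => rfl
  | cons s rest ih =>
    simp only [pvChained, List.all_cons, List.zip_cons_cons, ih s]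
    simp only [PySem.Set.contains, PySem.Set.ofList, PySem.Set.add]
    norm_num
    simp only [Bool.and_assoc, Bool.and_comm, Bool.and_left_comm]

-- with a ≠ b both valid, A's parity loop starting at an odd index equals the chained invariant
theorem pvALoop_eq_chained : ∀ (l : List String) (a b : String),
    (a = "JJ" ∨ a = "FF") → (b = "JJ" ∨ b = "FF") → a ≠ b →
    pvALoop a b 1 l = pvChained a l := by
  intro l
  induction l with
  | nil => intro a b _ _ _; rfl
  | cons s rest ih =>
    intro a b ha hb hab
    simp only [pvALoop, pvChained]
    norm_num
    by_cases hs : s = b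
    · subst hs
      rw [← ih s a hb ha (Ne.symm hab), pvALoop_one_swap rest s a, ← pvALoop_add_two a s rest 0]
      have hvb : (decide (s = "JJ") || decide (s = "FF")) = true := by
        rcases hb with h | h <;> simp [h]
      simp [hvb, hab]
    · simp only [hs, decide_false, Bool.false_and]
      symm
      rcases ha with rfl | rfl <;> rcases hb with rfl | rfl <;>
        by_cases hJ : s = "JJ" <;> by_cases hF : s = "FF" <;> simp_all

theorem is_rotation_JJ_FF_spec : Claim_equal_is_rotation_JJ_FF := by
  intro seq _
  unfold Spec_is_rotation_JJ_FF
  match seq with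
  | [] => rfl
  | [a] => simp [is_rotation_JJ_FF, is_rotation_JJ_FF_alt]
  | a :: b :: rest =>
    simp only [is_rotation_JJ_FF, is_rotation_JJ_FF_alt]
    by_cases hset : PySem.Set.equal (PySem.Set.ofList [a, b]) (PySem.Set.ofList ["JJ", "FF"]) = true
    · -- set equality holds: a,b ∈ {"JJ","FF"}, a ≠ b
      have hmem := (pvSetEq_iff a b).mp hset
      have ha : a = "JJ" ∨ a = "FF" := hmem.elim (fun h => Or.inl h.1) (fun h => Or.inr h.1)
      have hb : b = "JJ" ∨ b = "FF" := hmem.elim (fun h => Or.inr h.2) (fun h => Or.inl h.2)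
      have hab : a ≠ b := by rcases hmem with ⟨h1, h2⟩ | ⟨h1, h2⟩ <;> simp [h1, h2]
      rw [if_neg (by simp [hset])]
      have hstep : pvALoop a b 0 (a :: b :: rest) = pvALoop a b 1 (b :: rest) := by
        simp [pvALoop]
      rw [hstep, pvALoop_eq_chained (b :: rest) a b ha hb hab,
        pvChained_eq_alt_tail a (b :: rest)]
      have hva : (decide (a = "JJ") || decide (a = "FF")) = true := by
        rcases ha with rfl | rfl <;> simp
      simp [hva]
    · -- set equality fails: A is false; show B false too
      rw [if_pos (by simpa using hset)]
      symm
      by_contra hB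
      rw [Bool.not_eq_false] at hB
      simp only [Bool.and_eq_true, List.all_cons, List.zip_cons_cons, List.all_eq_true,
        decide_eq_true_eq] at hB
      obtain ⟨⟨_, hva, hvb, _⟩, hpairs⟩ := hB
      have hab : a ≠ b := hpairs (a, b) (by simp)
      apply hset
      apply (pvSetEq_iff a b).mpr
      simp only [PySem.Set.contains, PySem.Set.ofList, PySem.Set.add, List.contains] at hva hvb
      rcases (by simpa using hva : a = "JJ" ∨ a = "FF") with rfl | rfl <;>
      rcases (by simpa using hvb : b = "JJ" ∨ b = "FF") with rfl | rfl <;> simp_all
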